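-- pv_equiv track=rewrite | github.com/KirillKuzn/mai_py_labs | 4.4/05.py | bunny
-- ===== SOURCE A (Python) =====
-- def bunny(start, finish, length):
--     result = []
--
--     def ways_possible(pos, way, jumps):
--         if jumps == 0:
--             if pos == finish:
--                 result.append(way[:])
--             return
--         for next_pos in [pos + 1, pos - 1, pos + 3, pos - 3]:
--             if next_pos != finish or jumps == 1:
--                 way.append(next_pos)
--                 ways_possible(next_pos, way, jumps - 1)
--                 way.pop()
--
--     ways_possible(start, [start], length)
--     return result
-- ===== SOURCE B (Python) =====
-- def bunny(start, finish, length):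
--     if length < 0:
--         raise ValueError("length must be nonnegative")
--     frontier = [[start]]
--     for i in range(length):
--         last_round = (i == length - 1)
--         new_frontier = []
--         for path in frontier:
--             last = path[-1]
--             for nxt in (last + 1, last - 1, last + 3, last - 3):
--                 if nxt != finish or last_round:
--                     new_frontier.append(path + [nxt])
--         frontier = new_frontier
--     return [p for p in frontier if p[-1] == finish]
-- ===== Notes on version B (the rewrite author's own statement) =====
-- stated objective: alternative
-- what changed: Replaces the recursive DFS with a shared mutable path and global result accumulator by an iterative breadth-first level expansion over an explicit frontier of partial paths, filtering paths ending at finish after the loop.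
import Mathlib
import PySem

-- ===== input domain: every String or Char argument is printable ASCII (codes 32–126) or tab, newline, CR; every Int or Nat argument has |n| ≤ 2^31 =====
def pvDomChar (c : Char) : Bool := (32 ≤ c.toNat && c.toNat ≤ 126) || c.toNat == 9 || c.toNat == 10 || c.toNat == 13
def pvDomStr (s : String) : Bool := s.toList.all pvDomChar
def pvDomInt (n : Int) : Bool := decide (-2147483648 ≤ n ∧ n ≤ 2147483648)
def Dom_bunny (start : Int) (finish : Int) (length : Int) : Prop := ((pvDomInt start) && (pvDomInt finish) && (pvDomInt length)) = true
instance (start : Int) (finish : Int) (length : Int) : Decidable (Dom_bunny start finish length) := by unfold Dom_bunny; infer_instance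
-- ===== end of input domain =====

-- B replaces A's recursive DFS (shared mutable path + global accumulator) by an
-- iterative level expansion over an explicit frontier of partial paths; same output.

-- ===== PORT A =====
-- ways_possible(pos, way, jumps): recursion on jumps (a Nat here; Python's negative
-- jumps, which never terminate, are excluded by Pre_bunny). The shared `result`
-- accumulator appended in DFS order is rendered as the returned list, the for-loop
-- over the four children as flatMap in the same order, way.append/pop as `way ++ [np]`.
def waysPossible (finish : Int) (pos : Int) (way : List Int) : Nat → List (List Int)
  | 0 => if pos = finish then [way] else []
  | n + 1 =>
      [pos + 1, pos - 1, pos + 3, pos - 3].flatMap (fun np =>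
        if np ≠ finish ∨ n = 0 then waysPossible finish np (way ++ [np]) n else [])

def bunny (start : Int) (finish : Int) (length : Int) : List (List Int) :=
  waysPossible finish start [start] length.toNat

-- ===== PORT B =====
-- One round of the frontier expansion: extend every path by each of the four moves,
-- skipping an extension equal to finish unless this is the last round.
-- path[-1] is rendered as getLast?.getD 0: frontier paths are always nonempty.
-- (Source B's explicit `raise ValueError` on length < 0 lies outside Pre_bunny.)
def expandB (finish : Int) (lastRound : Bool) (frontier : List (List Int)) : List (List Int) :=
  frontier.flatMap (fun p =>
    let last := p.getLast?.getD 0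
    [last + 1, last - 1, last + 3, last - 3].flatMap (fun nxt =>
      if nxt ≠ finish ∨ lastRound then [p ++ [nxt]] else []))

-- the `for i in range(length)` loop, counted by rounds remaining (lastRound ⇔ none remain after)
def loopB (finish : Int) : Nat → List (List Int) → List (List Int)
  | 0, fr => fr
  | n + 1, fr => loopB finish n (expandB finish (n = 0) fr)

def bunny_alt (start : Int) (finish : Int) (length : Int) : List (List Int) :=
  (loopB finish length.toNat [[start]]).filter (fun p => p.getLast?.getD 0 = finish)

-- ===== PRECONDITION & SPEC =====
-- Pre_ excludes length < 0, where the Python A recurses without a base case and raises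
-- RecursionError (and B raises ValueError); no input on which A returns is excluded.
def Pre_bunny (start : Int) (finish : Int) (length : Int) : Prop := 0 ≤ length
instance (start : Int) (finish : Int) (length : Int) : Decidable (Pre_bunny start finish length) := by unfold Pre_bunny; infer_instance
def pvWitness_bunny : Int × Int × Int := (0, 2, 3)

def Spec_bunny (start : Int) (finish : Int) (length : Int) (out : List (List Int)) : Prop := out = bunny_alt start finish length
instance (start : Int) (finish : Int) (length : Int) (out : List (List Int)) : Decidable (Spec_bunny start finish length out) := by unfold Spec_bunny; infer_instance

-- ===== CLAIM (what is proved, stated in full; the proofs are below) =====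
def Claim_equal_bunny : Prop := ∀ (start : Int) (finish : Int) (length : Int), Dom_bunny start finish length → Pre_bunny start finish length → Spec_bunny start finish length (bunny start finish length)

-- ===== LEMMAS AND PROOFS =====

theorem expandB_append (finish : Int) (b : Bool) (x y : List (List Int)) :
    expandB finish b (x ++ y) = expandB finish b x ++ expandB finish b y := by
  simp [expandB]

theorem loopB_append (finish : Int) (n : Nat) (x y : List (List Int)) :
    loopB finish n (x ++ y) = loopB finish n x ++ loopB finish n y := by
  induction n generalizing x y with
  | zero => rfl
  | succ m ih => simp [loopB, expandB_append, ih]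

theorem loopB_nil (finish : Int) (n : Nat) : loopB finish n [] = [] := by
  induction n with
  | zero => rfl
  | succ m ih => simp [loopB, expandB, ih]

-- main invariant: filtering the expansion of a single nonempty path equals A's DFS from its last position
theorem main_inv (finish : Int) (n : Nat) :
    ∀ (p : List Int) (pos : Int), p.getLast? = some pos →
      (loopB finish n [p]).filter (fun q => q.getLast?.getD 0 = finish)
        = waysPossible finish pos p n := by
  induction n with
  | zero =>
      intro p pos h
      simp [loopB, waysPossible, List.filter, h]
      by_cases hp : pos = finish <;> simp [hp]
  | succ m ih =>
      intro p pos h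
      have hexp : expandB finish (decide (m = 0)) [p]
          = [pos + 1, pos - 1, pos + 3, pos - 3].flatMap (fun nxt =>
              if nxt ≠ finish ∨ (m = 0) then [p ++ [nxt]] else []) := by
        simp [expandB, h]
      have step : ∀ np : Int,
          (loopB finish m (if np ≠ finish ∨ (m = 0) then [p ++ [np]] else [])).filter
              (fun q => q.getLast?.getD 0 = finish)
            = (if np ≠ finish ∨ (m = 0) then waysPossible finish np (p ++ [np]) m else []) := by
        intro np
        by_cases hc : np ≠ finish ∨ (m = 0)
        · simp only [if_pos hc]
          exact ih (p ++ [np]) np (by simp)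
        · simp [if_neg hc, loopB_nil]
      show (loopB finish m (expandB finish (decide (m = 0)) [p])).filter
          (fun q => q.getLast?.getD 0 = finish) = _
      rw [hexp]
      simp only [List.flatMap_cons, List.flatMap_nil, List.append_nil,
        loopB_append, List.filter_append, step, waysPossible]

-- ===== VERDICT (by name: the statement is the Claim_ definition above) =====
theorem bunny_spec : Claim_equal_bunny := by
  intro start finish length _ _
  show bunny start finish length = bunny_alt start finish length
  unfold bunny bunny_alt
  exact (main_inv finish length.toNat [start] start (by simp)).symm
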